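-- pv_equiv track=rewrite | github.com/iansedano/aoc | python/src/aoc/2015/05.py | isNicePart2
-- ===== SOURCE A (Python) =====
-- def isNicePart2(input):
--     pairs = list(zip(input[:-1], input[1:]))
--     has_non_overlapping_pair = False
--     for i, pair in enumerate(pairs):
--         non_overlapping_pairs = [
--             pair for j, pair in enumerate(pairs) if j < i - 1 or j > i + 1
--         ]
--         if pair in non_overlapping_pairs:
--             has_non_overlapping_pair = True
--             break
--
--     if not has_non_overlapping_pair:
--         return False
--
--     for tri in zip(input[:-2], input[1:-1], input[2:]):
--         if tri[0] == tri[2]: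
--             return True
--
--     return False
-- ===== SOURCE B (Python) =====
-- def isNicePart2(input):
--     # One pass: dict of first index per adjacent pair; then one scan for x?x.
--     first = {}
--     has_pair = False
--     for i, p in enumerate(zip(input, input[1:])):
--         if p in first:
--             if i - first[p] >= 2:
--                 has_pair = True
--                 break
--         else:
--             first[p] = i
--     if not has_pair:
--         return False
--     for i in range(len(input) - 2):
--         if input[i] == input[i + 2]:
--             return True
--     return False
-- ===== Notes on version B (the rewrite author's own statement) =====
-- stated objective: faster
-- what changed: Replaced A's quadratic scheme (for every pair index, rebuild the full list of non-overlapping pairs and test membership) with a single pass that records the first index of each adjacent pair in a dict and flags a repeat at distance >= 2.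
import Mathlib
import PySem

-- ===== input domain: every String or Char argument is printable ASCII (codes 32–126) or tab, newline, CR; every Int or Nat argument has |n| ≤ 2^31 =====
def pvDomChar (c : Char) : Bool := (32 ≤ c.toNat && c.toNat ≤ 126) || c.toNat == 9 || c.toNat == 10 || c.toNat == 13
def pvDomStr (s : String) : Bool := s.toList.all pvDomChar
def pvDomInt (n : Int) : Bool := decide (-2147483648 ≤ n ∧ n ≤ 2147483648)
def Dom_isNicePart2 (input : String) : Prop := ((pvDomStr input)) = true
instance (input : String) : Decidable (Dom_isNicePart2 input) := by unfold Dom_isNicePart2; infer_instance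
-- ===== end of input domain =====

-- B replaces A's quadratic rebuild-and-scan pair search by a one-pass dict of first pair indices; return values agree on all inputs.

-- ===== PORT A =====
def isNicePart2 (input : String) : Bool :=
  let s := input.toList
  let pairs := List.zip (PySem.List.slice s none (some (-1))) (PySem.List.slice s (some 1) none)
  let hasPair := (PySem.List.enumerate pairs 0).any (fun ip =>
    decide (ip.2 ∈ ((PySem.List.enumerate pairs 0).filter
      (fun jp => decide (jp.1 < ip.1 - 1 ∨ ip.1 + 1 < jp.1))).map Prod.snd))
  if !hasPair then false
  else (List.zip (PySem.List.slice s none (some (-2)))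
        (List.zip (PySem.List.slice s (some 1) (some (-1))) (PySem.List.slice s (some 2) none))).any
        (fun t => t.1 == t.2.2)

-- ===== PORT B =====
def pvBFind (d : PySem.Dict (Char × Char) Int) : List (Int × (Char × Char)) → Bool
  | [] => false
  | (i, p) :: rest =>
    match d.get? p with
    | some f => if 2 ≤ i - f then true else pvBFind d rest
    | none => pvBFind (d.insert p i) rest

def isNicePart2_alt (input : String) : Bool :=
  let s := input.toList
  let hasPair := pvBFind PySem.Dict.empty (PySem.List.enumerate (List.zip s s.tail) 0)
  if !hasPair then false
  else (PySem.List.pyRange 0 ((s.length : Int) - 2) 1).any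
    (fun i => PySem.List.pyGetD s i ' ' == PySem.List.pyGetD s (i + 2) ' ')

-- ===== PRECONDITION & SPEC =====
def Spec_isNicePart2 (input : String) (out : Bool) : Prop := out = isNicePart2_alt input
instance (input : String) (out : Bool) : Decidable (Spec_isNicePart2 input out) := by unfold Spec_isNicePart2; infer_instance

-- ===== CLAIM (what is proved, stated in full; the proofs are below) =====
def Claim_equal_isNicePart2 : Prop := ∀ (input : String), Dom_isNicePart2 input → Spec_isNicePart2 input (isNicePart2 input)

-- ===== LEMMAS AND PROOFS =====

-- 'pair repeats at distance >= 2' as an index proposition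
def PairRep (pairs : List (Char × Char)) : Prop :=
  ∃ (i j : Nat), i + 2 ≤ j ∧ ∃ p, pairs[i]? = some p ∧ pairs[j]? = some p

-- 'some x.x triple' as an index proposition
def TriRep (s : List Char) : Prop :=
  ∃ (k : Nat), k + 2 < s.length ∧ s[k]? = s[k + 2]?

-- f is the index of the FIRST occurrence of p in l
def FirstAt (l : List (Char × Char)) (p : Char × Char) (f : Nat) : Prop :=
  l[f]? = some p ∧ ∀ m < f, l[m]? ≠ some p

theorem zip_dropLast_tail (s : List Char) :
    List.zip s.dropLast s.tail = List.zip s s.tail := by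
  induction s with
  | nil => rfl
  | cons a t ih =>
    cases t with
    | nil => rfl
    | cons b t' =>
      simp only [List.dropLast_cons₂, List.zip_cons_cons, List.tail_cons]
      rw [show (b :: t').dropLast.zip t' = ((b::t').dropLast.zip (b::t').tail) from rfl, ih,
          List.tail_cons]

theorem slice_one_negone (s : List Char) : PySem.List.slice s (some 1) (some (-1)) = s.tail.dropLast := by
  cases s with
  | nil => rfl
  | cons a t =>
    simp [PySem.List.slice, PySem.List.clampIdx, List.dropLast_eq_take]
    split_ifs <;> omega

theorem triRep_cons (a b c : Char) (t : List Char) :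
    TriRep (a :: b :: c :: t) ↔ (a = c ∨ TriRep (b :: c :: t)) := by
  constructor
  · rintro ⟨k, hk, he⟩
    cases k with
    | zero => left; simpa using he
    | succ k' => right; exact ⟨k', by simpa using hk, by simpa using he⟩
  · rintro (h | ⟨k, hk, he⟩)
    · exact ⟨0, by simp, by simp [h]⟩
    · exact ⟨k + 1, by simpa using hk, by simpa using he⟩

theorem triZip (s : List Char) :
    ((List.zip (s.take (s.length - 2)) (List.zip s.tail.dropLast (s.drop 2))).any
      (fun t => t.1 == t.2.2) = true) ↔ TriRep s := by
  induction s with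
  | nil => simp [TriRep]
  | cons a t ih =>
    cases t with
    | nil => simp [TriRep]
    | cons b t' =>
      cases t' with
      | nil => simp [TriRep]
      | cons c t'' =>
        have h1 : (a::b::c::t'').take ((a::b::c::t'').length - 2)
            = a :: ((b::c::t'').take ((b::c::t'').length - 2)) := by simp
        have h2 : (a::b::c::t'').tail.dropLast = b :: ((b::c::t'').tail.dropLast) := by simp
        have h3 : (a::b::c::t'').drop 2 = c :: ((b::c::t'').drop 2) := rfl
        rw [h1, h2, h3, List.zip_cons_cons, List.zip_cons_cons, List.any_cons, triRep_cons]
        simp only [Bool.or_eq_true, ih, beq_iff_eq]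

theorem aTri_iff (s : List Char) :
    ((List.zip (PySem.List.slice s none (some (-2)))
        (List.zip (PySem.List.slice s (some 1) (some (-1))) (PySem.List.slice s (some 2) none))).any
        (fun t => t.1 == t.2.2) = true) ↔ TriRep s := by
  rw [PySem.List.slice_to_neg_ofNat s 2 (by norm_num), slice_one_negone,
      PySem.List.slice_from s (by norm_num)]
  exact triZip s

theorem bTri_iff (s : List Char) :
    ((PySem.List.pyRange 0 ((s.length : Int) - 2) 1).any
      (fun i => PySem.List.pyGetD s i ' ' == PySem.List.pyGetD s (i + 2) ' ') = true) ↔ TriRep s := by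
  rw [List.any_eq_true]
  constructor
  · rintro ⟨i, hmem, hbeq⟩
    rw [PySem.List.mem_pyRange_one] at hmem
    obtain ⟨h0, h1⟩ := hmem
    lift i to Nat using h0 with k
    refine ⟨k, by omega, ?_⟩
    rw [PySem.List.pyGetD_natCast, show (k:Int)+2 = ((k+2:Nat):Int) by push_cast; ring,
        PySem.List.pyGetD_natCast, List.getD_eq_getElem?_getD, List.getD_eq_getElem?_getD] at hbeq
    rw [List.getElem?_eq_getElem (show k < s.length by omega),
        List.getElem?_eq_getElem (show k + 2 < s.length by omega)] at hbeq ⊢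
    simpa using hbeq
  · rintro ⟨k, hk, he⟩
    refine ⟨(k : Int), by rw [PySem.List.mem_pyRange_one]; omega, ?_⟩
    simp only [PySem.List.pyGetD_natCast, show (k:Int)+2 = ((k+2:Nat):Int) by push_cast; ring]
    rw [List.getD_eq_getElem?_getD, List.getD_eq_getElem?_getD, he]
    simp


theorem aPair_iff (pairs : List (Char × Char)) :
    ((PySem.List.enumerate pairs 0).any (fun ip =>
      decide (ip.2 ∈ ((PySem.List.enumerate pairs 0).filter
        (fun jp => decide (jp.1 < ip.1 - 1 ∨ ip.1 + 1 < jp.1))).map Prod.snd)) = true)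
      ↔ PairRep pairs := by
  rw [List.any_eq_true]
  constructor
  · rintro ⟨ip, hip, hmem⟩
    rw [PySem.List.mem_enumerate_iff] at hip
    obtain ⟨k, hk, rfl⟩ := hip
    simp only [decide_eq_true_eq, List.mem_map, List.mem_filter] at hmem
    obtain ⟨jp, ⟨hjp, hcond⟩, hEq⟩ := hmem
    rw [PySem.List.mem_enumerate_iff] at hjp
    obtain ⟨l, hl, rfl⟩ := hjp
    
    rcases hcond with h | h
    · exact ⟨l, k, by omega, pairs[l],
        List.getElem?_eq_getElem hl, by rw [List.getElem?_eq_getElem hk]; exact congrArg some hEq.symm⟩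
    · exact ⟨k, l, by omega, pairs[k],
        List.getElem?_eq_getElem hk, by rw [List.getElem?_eq_getElem hl]; exact congrArg some hEq⟩
  · rintro ⟨i, j, hij, p, hi, hj⟩
    have hj' : j < pairs.length := by
      by_contra h
      simp [List.getElem?_eq_none (show pairs.length ≤ j by omega)] at hj
    have hi' : i < pairs.length := by omega
    rw [List.getElem?_eq_getElem hi'] at hi
    rw [List.getElem?_eq_getElem hj'] at hj
    refine ⟨(0 + (j:Int), pairs[j]), ?_, ?_⟩
    · rw [PySem.List.mem_enumerate_iff]; exact ⟨j, hj', rfl⟩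
    · simp only [decide_eq_true_eq, List.mem_map, List.mem_filter]
      refine ⟨(0 + (i:Int), pairs[i]), ⟨?_, by simp only; left; omega⟩, ?_⟩
      · rw [PySem.List.mem_enumerate_iff]; exact ⟨i, hi', rfl⟩
      · simp only
        rw [Option.some_injective _ hi, Option.some_injective _ hj]


theorem firstAt_lt (l : List (Char × Char)) (p : Char × Char) (f : Nat)
    (h : FirstAt l p f) : f < l.length := by
  by_contra hc
  have h1 := h.1
  rw [List.getElem?_eq_none (show l.length ≤ f by omega)] at h1
  cases h1

theorem firstAt_unique {l : List (Char × Char)} {p : Char × Char} {f f' : Nat}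
    (h : FirstAt l p f) (h' : FirstAt l p f') : f = f' := by
  by_contra hne
  rcases Nat.lt_or_ge f f' with hlt | hge
  · exact h'.2 f hlt h.1
  · exact h.2 f' (by omega) h'.1

theorem firstAt_le {l : List (Char × Char)} {p : Char × Char} {f i : Nat}
    (h : FirstAt l p f) (hi : l[i]? = some p) : f ≤ i := by
  by_contra hc
  exact h.2 i (by omega) hi

theorem exists_firstAt_of_mem {l : List (Char × Char)} {p : Char × Char}
    (h : p ∈ l) : ∃ f, FirstAt l p f := by
  induction l with
  | nil => simp at h
  | cons q t ih =>
    by_cases hq : q = p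
    · exact ⟨0, by simp [hq], by omega⟩
    · rcases ih (by rcases List.mem_cons.mp h with h | h; exact absurd h.symm hq; exact h) with ⟨f, hf1, hf2⟩
      refine ⟨f + 1, by simpa using hf1, ?_⟩
      intro m hm
      cases m with
      | zero => simpa using fun he => hq he
      | succ m' => simpa using hf2 m' (by omega)

theorem mem_of_firstAt {l : List (Char × Char)} {p : Char × Char} {f : Nat}
    (h : FirstAt l p f) : p ∈ l :=
  List.mem_of_getElem? h.1

theorem firstAt_append_left {l l' : List (Char × Char)} {p : Char × Char} {f : Nat}
    (h : FirstAt l p f) : FirstAt (l ++ l') p f := by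
  have hf := firstAt_lt _ _ _ h
  refine ⟨by rw [List.getElem?_append_left hf]; exact h.1, fun m hm => ?_⟩
  rw [List.getElem?_append_left (by omega)]
  exact h.2 m hm

theorem firstAt_append_new {l : List (Char × Char)} {p : Char × Char}
    (h : p ∉ l) : FirstAt (l ++ [p]) p l.length := by
  refine ⟨?_, fun m hm => ?_⟩
  · rw [List.getElem?_append_right (le_refl _)]
    simp
  · rw [List.getElem?_append_left hm]
    intro he
    exact h (List.mem_of_getElem? he)

theorem firstAt_append_single_iff {l : List (Char × Char)} {p q : Char × Char} {f : Nat}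
    (h : p ≠ q ∨ p ∈ l) : FirstAt (l ++ [q]) p f ↔ FirstAt l p f := by
  constructor
  · rintro ⟨h1, h2⟩
    have hf : f < l.length := by
      have hlen := firstAt_lt _ _ _ ⟨h1, h2⟩
      simp only [List.length_append, List.length_cons, List.length_nil] at hlen
      rcases Nat.lt_or_ge f l.length with h' | h'
      · exact h'
      · -- f = l.length, so the element is q
        have hfl : f = l.length := by omega
        rw [List.getElem?_append_right h', hfl] at h1
        simp at h1
        rcases h with hne | hmem
        · exact absurd h1.symm hne
        · -- p = q ∈ l, but then some m < l.length has l[m]? = some p, contradicting minimality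
          exfalso
          rcases List.getElem_of_mem hmem with ⟨m, hm, hme⟩
          exact h2 m (by omega) (by rw [List.getElem?_append_left hm]; rw [List.getElem?_eq_getElem hm, hme])
    refine ⟨by rw [List.getElem?_append_left hf] at h1; exact h1, fun m hm => ?_⟩
    intro he
    exact h2 m hm (by rw [List.getElem?_append_left (by omega)]; exact he)
  · exact firstAt_append_left


def DInv (d : PySem.Dict (Char × Char) Int) (pre : List (Char × Char)) : Prop :=
  ∀ p f, d.get? p = some f ↔ ∃ k : Nat, f = (k : Int) ∧ FirstAt pre p k

def BRhs (pre suf : List (Char × Char)) : Prop :=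
  ∃ (j f : Nat) (p : Char × Char), suf[j]? = some p ∧
    FirstAt (pre ++ suf.take j) p f ∧ f + 2 ≤ pre.length + j

-- shift lemma: the j = 0 disjunct is impossible when q has no first occurrence f with f + 2 ≤ pre.length
theorem brhs_cons (pre : List (Char × Char)) (q : Char × Char) (rest : List (Char × Char))
    (h0 : ∀ f : Nat, FirstAt pre q f → ¬ (f + 2 ≤ pre.length)) :
    BRhs pre (q :: rest) ↔ BRhs (pre ++ [q]) rest := by
  constructor
  · rintro ⟨j, f, p, h1, h2, h3⟩
    cases j with
    | zero =>
      simp only [List.getElem?_cons_zero, Option.some.injEq] at h1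
      subst h1
      rw [List.take_zero, List.append_nil] at h2
      exact absurd h3 (by simpa using h0 f h2)
    | succ j' =>
      refine ⟨j', f, p, by simpa using h1, ?_, ?_⟩
      · simpa [List.append_assoc] using h2
      · simp only [List.length_append, List.length_cons, List.length_nil]; omega
  · rintro ⟨j, f, p, h1, h2, h3⟩
    refine ⟨j + 1, f, p, by simpa using h1, ?_, ?_⟩
    · simpa [List.append_assoc] using h2
    · simp only [List.length_append, List.length_cons, List.length_nil] at h3 ⊢; omega

theorem bLoop_iff (suf : List (Char × Char)) :
    ∀ (pre : List (Char × Char)) (d : PySem.Dict (Char × Char) Int), DInv d pre →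
    (pvBFind d (PySem.List.enumerate suf (pre.length : Int)) = true ↔ BRhs pre suf) := by
  induction suf with
  | nil =>
    intro pre d _
    simp [PySem.List.enumerate_nil, pvBFind, BRhs]
  | cons q rest ih =>
    intro pre d hinv
    rw [PySem.List.enumerate_cons]
    have hcast : (pre.length : Int) + 1 = ((pre ++ [q]).length : Int) := by simp
    cases hdq : d.get? q with
    | none =>
      have hqpre : q ∉ pre := by
        intro hmem
        rcases exists_firstAt_of_mem hmem with ⟨f, hf⟩
        have h := (hinv q (f : Int)).mpr ⟨f, rfl, hf⟩
        rw [hdq] at h; cases h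
      have hinv' : DInv (d.insert q (pre.length : Int)) (pre ++ [q]) := by
        intro p f
        rw [PySem.Dict.get?_insert]
        by_cases hpq : p = q
        · subst hpq
          simp only [if_true, Option.some.injEq]
          constructor
          · rintro rfl
            exact ⟨pre.length, rfl, firstAt_append_new hqpre⟩
          · rintro ⟨k, rfl, hk⟩
            rw [firstAt_unique hk (firstAt_append_new hqpre)]
        · rw [if_neg hpq, hinv p f]
          constructor
          · rintro ⟨k, rfl, hk⟩
            exact ⟨k, rfl, (firstAt_append_single_iff (Or.inl hpq)).mpr hk⟩
          · rintro ⟨k, rfl, hk⟩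
            exact ⟨k, rfl, (firstAt_append_single_iff (Or.inl hpq)).mp hk⟩
      have hstep : pvBFind d ((( pre.length : Int), q) :: PySem.List.enumerate rest ((pre.length : Int) + 1)) =
          pvBFind (d.insert q (pre.length : Int)) (PySem.List.enumerate rest ((pre.length : Int) + 1)) := by
        simp [pvBFind, hdq]
      rw [hstep, hcast, ih (pre ++ [q]) _ hinv',
          brhs_cons pre q rest (fun f hf _ => hqpre (mem_of_firstAt hf))]
    | some f0 =>
      obtain ⟨k0, rfl, hk0⟩ := (hinv q f0).mp hdq
      by_cases hbr : (2 : Int) ≤ (pre.length : Int) - (k0 : Int)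
      · have hstep : pvBFind d (((pre.length : Int), q) :: PySem.List.enumerate rest ((pre.length : Int) + 1)) = true := by
          simp [pvBFind, hdq, hbr]
        rw [hstep]
        exact iff_of_true rfl ⟨0, k0, q, by simp, by simpa using hk0, by omega⟩
      · have hstep : pvBFind d (((pre.length : Int), q) :: PySem.List.enumerate rest ((pre.length : Int) + 1)) =
            pvBFind d (PySem.List.enumerate rest ((pre.length : Int) + 1)) := by
          simp [pvBFind, hdq, hbr]
        have hinv' : DInv d (pre ++ [q]) := by
          intro p f
          rw [hinv p f]
          have hside : p ≠ q ∨ p ∈ pre := by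
            by_cases hpq : p = q
            · exact Or.inr (hpq ▸ mem_of_firstAt hk0)
            · exact Or.inl hpq
          constructor
          · rintro ⟨k, rfl, hk⟩
            exact ⟨k, rfl, (firstAt_append_single_iff hside).mpr hk⟩
          · rintro ⟨k, rfl, hk⟩
            exact ⟨k, rfl, (firstAt_append_single_iff hside).mp hk⟩
        rw [hstep, hcast, ih (pre ++ [q]) _ hinv',
            brhs_cons pre q rest (fun f hf hle => by
              rw [firstAt_unique hf hk0] at hle; omega)]

theorem bPair_iff (pairs : List (Char × Char)) :
    (pvBFind PySem.Dict.empty (PySem.List.enumerate pairs 0) = true) ↔ PairRep pairs := by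
  have h0 : DInv PySem.Dict.empty [] := by
    intro p f
    constructor
    · intro h; rw [PySem.Dict.get?_empty] at h; cases h
    · rintro ⟨k, rfl, hk, -⟩; simp at hk
  have hmain := bLoop_iff pairs [] PySem.Dict.empty h0
  simp only [BRhs, List.length_nil, Nat.cast_zero, List.nil_append, Nat.zero_add] at hmain
  rw [hmain]
  constructor
  · rintro ⟨j, f, p, hj, hf, hle⟩
    have hfl := firstAt_lt _ _ _ hf
    rw [List.length_take] at hfl
    have hf' : pairs[f]? = some p := by
      have h1 := hf.1
      rwa [List.getElem?_take_of_lt (by omega)] at h1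
    exact ⟨f, j, by omega, p, hf', hj⟩
  · rintro ⟨i, j, hij, p, hi, hj⟩
    have hi' : (pairs.take j)[i]? = some p := by
      rwa [List.getElem?_take_of_lt (by omega)]
    rcases exists_firstAt_of_mem (List.mem_of_getElem? hi') with ⟨f, hf⟩
    have hfle := firstAt_le hf hi'
    exact ⟨j, f, p, hj, hf, by omega⟩

-- ===== VERDICT (by name: the statement is the Claim_ definition above) =====
theorem isNicePart2_spec : Claim_equal_isNicePart2 := by
  intro input _
  unfold Spec_isNicePart2 isNicePart2 isNicePart2_alt
  simp only [PySem.List.slice_to_neg_one, PySem.List.slice_from_one]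
  rw [zip_dropLast_tail]
  set s := input.toList
  set pairs := List.zip s s.tail
  have hAB : ((PySem.List.enumerate pairs 0).any (fun ip =>
      decide (ip.2 ∈ ((PySem.List.enumerate pairs 0).filter
        (fun jp => decide (jp.1 < ip.1 - 1 ∨ ip.1 + 1 < jp.1))).map Prod.snd)))
      = pvBFind PySem.Dict.empty (PySem.List.enumerate pairs 0) := by
    rw [Bool.eq_iff_iff, aPair_iff, bPair_iff]
  have hT : ((List.zip (PySem.List.slice s none (some (-2)))
        (List.zip (PySem.List.slice s (some 1) (some (-1))) (PySem.List.slice s (some 2) none))).any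
        (fun t => t.1 == t.2.2))
      = ((PySem.List.pyRange 0 ((s.length : Int) - 2) 1).any
        (fun i => PySem.List.pyGetD s i ' ' == PySem.List.pyGetD s (i + 2) ' ')) := by
    rw [Bool.eq_iff_iff, aTri_iff, bTri_iff]
  rw [hAB, hT]
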